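-- pv_equiv track=rewrite | github.com/Owen-Yang-18/cs329 | src/quiz/quiz4.py | bf_remove
-- ===== SOURCE A (Python) =====
-- import itertools
--
-- def findMax(sequence):
--     k = 1
--     sequence.sort(key=lambda x: x[2])
--     r1 = sequence[0][2]
--
--     for i in range(1, len(sequence)):
--         l = sequence[i][1]
--         r2 = sequence[i][2]
--
--         if l > r1:
--             r1 = r2
--             k += 1
--     return k
--
-- def nonoverlap(seq):
--     seq.sort(key=lambda x:x[2])
--     for i in range(len(seq)-1):
--         if seq[i+1][1] < seq[i][2]:
--             return False
--     return True
--
-- def bf_remove(sequence):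
--     k = findMax(sequence)
--     maxval = -1
--     maxseq = list()
--     for seq in itertools.combinations(sequence, k):
--         seq = list(seq)
--         if nonoverlap(seq):
--             total = sum([item[2]-item[1] for item in seq])
--             if total > maxval:
--                 maxval = total
--                 maxseq = seq
--     return maxseq
-- ===== SOURCE B (Python) =====
-- def bf_remove(sequence):
--     # NOTE: like the original, this sorts `sequence` in place by right endpoint.
--     sequence.sort(key=lambda x: x[2])
--     # greedy count of a maximal chain (same k the original computes)
--     r1 = sequence[0][2]
--     k = 1
--     for item in sequence[1:]:
--         if item[1] > r1:
--             r1 = item[2]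
--             k += 1
--     # backtracking over the sorted list: enumerate only feasible (non-overlapping)
--     # k-subsequences, in the same lexicographic order, threading the running best.
--     def go(items, last_r, need, chosen, total, best):
--         if need == 0:
--             if total > best[0]:
--                 return (total, chosen)
--             return best
--         if len(items) < need:
--             return best
--         x = items[0]
--         rest = items[1:]
--         if last_r is None or x[1] >= last_r:
--             best = go(rest, x[2], need - 1, chosen + [x],
--                       total + (x[2] - x[1]), best)
--         return go(rest, last_r, need, chosen, total, best)
--     return go(sequence, None, k, [], 0, (-1, []))[1]
-- ===== Notes on version B (the rewrite author's own statement) =====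
-- stated objective: faster
-- what changed: Replaced generate-and-test over all C(n,k) combinations (each re-sorted, re-checked for overlap and re-summed) by a backtracking search over the once-sorted list that extends only non-overlapping prefixes, maintaining the last right endpoint and the running total incrementally, visiting candidates in the same lexicographic order so the first-strictly-greater tie-breaking is preserved.
import Mathlib
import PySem

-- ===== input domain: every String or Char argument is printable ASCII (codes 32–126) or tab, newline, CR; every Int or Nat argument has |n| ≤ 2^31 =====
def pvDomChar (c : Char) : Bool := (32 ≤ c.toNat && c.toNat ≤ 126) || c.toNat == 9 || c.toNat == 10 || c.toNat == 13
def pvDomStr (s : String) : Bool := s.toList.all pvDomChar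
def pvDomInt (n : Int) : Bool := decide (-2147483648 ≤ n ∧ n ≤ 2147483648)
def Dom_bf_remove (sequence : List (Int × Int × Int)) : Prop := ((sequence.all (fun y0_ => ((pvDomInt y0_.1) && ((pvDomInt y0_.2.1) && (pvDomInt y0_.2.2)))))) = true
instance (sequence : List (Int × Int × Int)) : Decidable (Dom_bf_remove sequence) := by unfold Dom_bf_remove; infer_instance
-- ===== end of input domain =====

-- B is a different algorithm for the same exact value: backtracking with incremental
-- feasibility/total instead of generate-and-test over all combinations.  Both the
-- Python A and B sort `sequence` in place; the theorems are about the return value.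

-- ===== PORT A =====
-- findMax: sort by x[2], then the greedy counting loop over range(1, len)
def pvFindMax (sequence : List (Int × Int × Int)) : Int × Nat :=
  let s := PySem.List.sorted sequence (fun x => x.2.2) false
  let r1 := (PySem.List.pyGetD s 0 ((0 : Int), (0 : Int), (0 : Int))).2.2
  (PySem.List.pyRange 1 (PySem.List.len s) 1).foldl
    (fun (st : Int × Nat) i =>
      let l := (PySem.List.pyGetD s i ((0 : Int), (0 : Int), (0 : Int))).2.1
      let r2 := (PySem.List.pyGetD s i ((0 : Int), (0 : Int), (0 : Int))).2.2
      if l > st.1 then (r2, st.2 + 1) else st)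
    (r1, 1)

-- the loop of nonoverlap: for i in range(len(seq)-1): if seq[i+1][1] < seq[i][2]: return False
def pvNonoverlap (seq : List (Int × Int × Int)) : Bool :=
  let s := PySem.List.sorted seq (fun x => x.2.2) false
  (PySem.List.pyRange 0 (PySem.List.len s - 1) 1).foldl
    (fun ok i =>
      if (PySem.List.pyGetD s (i + 1) ((0 : Int), (0 : Int), (0 : Int))).2.1
           < (PySem.List.pyGetD s i ((0 : Int), (0 : Int), (0 : Int))).2.2 then false
      else ok)
    true

def bf_remove (sequence : List (Int × Int × Int)) : List (Int × Int × Int) :=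
  let k := (pvFindMax sequence).2
  let s := PySem.List.sorted sequence (fun x => x.2.2) false  -- findMax sorted `sequence` in place
  (((PySem.List.combinations s k).foldl
      (fun (acc : Int × List (Int × Int × Int)) seq =>
        if pvNonoverlap seq then
          let total := (seq.map (fun item => item.2.2 - item.2.1)).sum
          if total > acc.1 then (total, seq) else acc
        else acc)
      (-1, []))).2

-- ===== PORT B =====
def pvGo : List (Int × Int × Int) → Option Int → Nat → List (Int × Int × Int) → Int →
    (Int × List (Int × Int × Int)) → Int × List (Int × Int × Int)
  | _, _, 0, chosen, total, best => if total > best.1 then (total, chosen) else best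
  | items, lastR, need + 1, chosen, total, best =>
    if items.length < need + 1 then best
    else
      match items with
      | [] => best
      | x :: rest =>
        let best1 :=
          if (match lastR with | none => true | some v => decide (v ≤ x.2.1)) then
            pvGo rest (some x.2.2) need (chosen ++ [x]) (total + (x.2.2 - x.2.1)) best
          else best
        pvGo rest lastR (need + 1) chosen total best1

def bf_remove_alt (sequence : List (Int × Int × Int)) : List (Int × Int × Int) :=
  let s := PySem.List.sorted sequence (fun x => x.2.2) false
  match s with
  | [] => []  -- unreachable under Pre_ (the Python raises IndexError on [])
  | h :: t =>
    let fk := t.foldl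
      (fun (st : Int × Nat) item =>
        if item.2.1 > st.1 then (item.2.2, st.2 + 1) else st)
      (h.2.2, 1)
    (pvGo s none fk.2 [] 0 (-1, [])).2

-- ===== PRECONDITION & SPEC =====
-- Pre_ excludes only the empty list, on which the Python A (and B) raises IndexError.
def Pre_bf_remove (sequence : List (Int × Int × Int)) : Prop := sequence ≠ []
instance (sequence : List (Int × Int × Int)) : Decidable (Pre_bf_remove sequence) := by
  unfold Pre_bf_remove; infer_instance

def pvWitness_bf_remove : (List (Int × Int × Int)) := [(1, 0, 2), (2, 3, 5), (3, 1, 4)]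

def Spec_bf_remove (sequence : List (Int × Int × Int)) (out : List (Int × Int × Int)) : Prop :=
  out = bf_remove_alt sequence
instance (sequence : List (Int × Int × Int)) (out : List (Int × Int × Int)) :
    Decidable (Spec_bf_remove sequence out) := by unfold Spec_bf_remove; infer_instance

-- ===== CLAIM (what is proved, stated in full; the proofs are below) =====
def Claim_equal_bf_remove : Prop := ∀ (sequence : List (Int × Int × Int)),
  Dom_bf_remove sequence → Pre_bf_remove sequence →
  Spec_bf_remove sequence (bf_remove sequence)

-- ===== LEMMAS AND PROOFS =====

-- proof-side view of B's incremental feasibility check: the chain condition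
def pvChain : Option Int → List (Int × Int × Int) → Bool
  | _, [] => true
  | r, x :: xs =>
    (match r with | none => true | some v => decide (v ≤ x.2.1)) && pvChain (some x.2.2) xs

-- the adjacency scan (as a Nat-indexed any) equals B's chain condition
theorem pvAny_eq_chain (c : List (Int × Int × Int)) :
    ((List.range (c.length - 1)).any
        (fun k => decide ((c.getD (k + 1) ((0 : Int), (0 : Int), (0 : Int))).2.1
                    < (c.getD k ((0 : Int), (0 : Int), (0 : Int))).2.2)))
      = !(pvChain none c) := by
  match c with
  | [] => simp [pvChain]
  | [a] => simp [pvChain]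
  | a :: b :: t =>
    have ih := pvAny_eq_chain (b :: t)
    simp only [List.length_cons, Nat.add_sub_cancel] at ih ⊢
    rw [List.range_succ_eq_map]
    simp only [List.any_cons, List.any_map, Function.comp_def, List.getD_cons_succ,
      List.getD_cons_zero] at ih ⊢
    rw [ih]
    show (decide (b.2.1 < a.2.2) || _) = _
    have hch : pvChain none (a :: b :: t)
        = (decide (a.2.2 ≤ b.2.1) && pvChain none (b :: t)) := by
      simp [pvChain]
    rw [hch]
    cases h : pvChain none (b :: t) <;> cases h2 : decide (a.2.2 ≤ b.2.1) <;> simp_all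

-- A's nonoverlap of an already key-sorted list is B's chain condition
theorem pvNonoverlap_eq_chain (c : List (Int × Int × Int))
    (hc : c.Pairwise (fun a b => a.2.2 ≤ b.2.2)) :
    pvNonoverlap c = pvChain none c := by
  simp only [pvNonoverlap]
  rw [show (PySem.List.sorted c (fun x => x.2.2) false) = c from
        PySem.List.sorted_eq_self_of_pairwise c _ hc]
  rw [PySem.List.foldl_congr_mem _ _
        (fun ok i => if (fun j => decide ((PySem.List.pyGetD c (j + 1) ((0:Int),(0:Int),(0:Int))).2.1
             < (PySem.List.pyGetD c j ((0:Int),(0:Int),(0:Int))).2.2)) i = true then false else ok) _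
        (by intro acc x _; simp)]
  rw [PySem.List.foldl_if_false_eq]
  rw [show pvChain none c = !!(pvChain none c) from (Bool.not_not _).symm, ← pvAny_eq_chain c]
  simp only [Bool.true_and, PySem.List.len_eq]
  rw [PySem.List.pyRange_one]
  rw [show ((c.length : Int) - 1 - 0).toNat = c.length - 1 from by omega]
  rw [List.any_map]
  refine congrArg Bool.not (congrArg (List.range (c.length - 1)).any (funext fun k => ?_))
  simp only [Function.comp_def, zero_add]
  rw [show ((k : Int) + 1) = ((k + 1 : Nat) : Int) from by push_cast; ring]
  rw [PySem.List.pyGetD_natCast, PySem.List.pyGetD_natCast]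

-- the backtracking search pvGo, threading the running best, is exactly the fold of
-- A's update step over the combinations list (restricted by the chain condition)
theorem pvGo_eq_foldl (items : List (Int × Int × Int)) (need : Nat) (lastR : Option Int)
    (chosen : List (Int × Int × Int)) (total : Int) (best : Int × List (Int × Int × Int)) :
    pvGo items lastR need chosen total best =
      (PySem.List.combinations items need).foldl
        (fun b c =>
          if pvChain lastR c then
            if total + (c.map (fun item => item.2.2 - item.2.1)).sum > b.1 then
              (total + (c.map (fun item => item.2.2 - item.2.1)).sum, chosen ++ c)
            else b
          else b)
        best := by
  induction items generalizing need lastR chosen total best with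
  | nil =>
    cases need with
    | zero => simp [pvGo, PySem.List.combinations_zero, pvChain]
    | succ n => simp [pvGo, PySem.List.combinations_nil_succ]
  | cons x rest ih =>
    cases need with
    | zero => simp [pvGo, PySem.List.combinations_zero, pvChain]
    | succ n =>
      by_cases hlen : (x :: rest).length < n + 1
      · rw [PySem.List.combinations_eq_nil_of_length_lt _ hlen]
        rw [pvGo.eq_def]
        dsimp only
        rw [if_pos hlen]
        simp
      · rw [PySem.List.combinations_cons_succ, List.foldl_append, List.foldl_map]
        have hgo : pvGo (x :: rest) lastR (n + 1) chosen total best =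
            pvGo rest lastR (n + 1) chosen total
              (if (match lastR with | none => true | some v => decide (v ≤ x.2.1)) then
                pvGo rest (some x.2.2) n (chosen ++ [x]) (total + (x.2.2 - x.2.1)) best
               else best) := by
          rw [pvGo.eq_def]
          dsimp only
          rw [if_neg hlen]
        rw [hgo, ih]
        congr 1
        cases hcond : (match lastR with | none => true | some v => decide (v ≤ x.2.1)) with
        | true =>
          rw [ih]
          apply PySem.List.foldl_congr_mem
          intro acc c _
          have hch : pvChain lastR (x :: c) = pvChain (some x.2.2) c := by
            simp [pvChain, hcond]
          rw [hch]
          simp only [List.map_cons, List.sum_cons]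
          rw [show total + (x.2.2 - x.2.1 + (c.map (fun item => item.2.2 - item.2.1)).sum)
                = total + (x.2.2 - x.2.1) + (c.map (fun item => item.2.2 - item.2.1)).sum
              from by ring]
          rw [show chosen ++ x :: c = (chosen ++ [x]) ++ c from by simp]
        | false =>
          rw [show (List.foldl _ best ((PySem.List.combinations rest n))) = best from ?_]
          · rfl
          · rw [PySem.List.foldl_congr_mem _ _ (fun acc _ => acc) _ ?_]
            · exact PySem.List.foldl_ignore _ _
            · intro acc c _
              have hch : pvChain lastR (x :: c) = false := by
                simp [pvChain, hcond]
              simp [hch]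

-- ===== VERDICT (by name: the statement is the Claim_ definition above) =====
theorem bf_remove_spec : Claim_equal_bf_remove := by
  intro sequence hdom hpre
  simp only [Spec_bf_remove, bf_remove, bf_remove_alt, pvFindMax]
  obtain ⟨h, t, hs⟩ : ∃ h t, PySem.List.sorted sequence (fun x => x.2.2) false = h :: t := by
    cases hseq : PySem.List.sorted sequence (fun x => x.2.2) false with
    | nil => exact absurd ((PySem.List.sorted_eq_nil_iff _ _ _).mp hseq) hpre
    | cons a b => exact ⟨a, b, rfl⟩
  rw [hs]
  set k := (List.foldl
      (fun st i =>
        let l := (PySem.List.pyGetD (h :: t) i ((0:Int),(0:Int),(0:Int))).2.1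
        let r2 := (PySem.List.pyGetD (h :: t) i ((0:Int),(0:Int),(0:Int))).2.2
        if l > st.1 then (r2, st.2 + 1) else st)
      ((PySem.List.pyGetD (h :: t) 0 ((0:Int),(0:Int),(0:Int))).2.2, 1)
      (PySem.List.pyRange 1 (PySem.List.len (h :: t)) 1)).2 with hk
  have hk2 : k = (t.foldl
      (fun st item => if item.2.1 > st.1 then (item.2.2, st.2 + 1) else st)
      (h.2.2, 1)).2 := by
    rw [hk]
    have hfold := PySem.List.foldl_pyRange_pyGetD (h :: t) ((0:Int),(0:Int),(0:Int))
      (fun st item => if item.2.1 > st.1 then (item.2.2, st.2 + 1) else st)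
      ((PySem.List.pyGetD (h :: t) 0 ((0:Int),(0:Int),(0:Int))).2.2, 1) (a := 1) (by norm_num)
    simp only [PySem.List.pyGetD_zero_cons] at hfold ⊢
    rw [hfold]
    norm_num
  dsimp only
  rw [← hk2, pvGo_eq_foldl]
  simp only [zero_add, List.nil_append]
  have hpair : (h :: t).Pairwise (fun a b : Int × Int × Int => a.2.2 ≤ b.2.2) := by
    have hp := PySem.List.sorted_pairwise sequence (fun x : Int × Int × Int => x.2.2)
    rwa [hs] at hp
  refine congrArg Prod.snd (PySem.List.foldl_congr_mem _ _ _ _ ?_)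
  intro acc c hc
  rw [pvNonoverlap_eq_chain c (hpair.sublist (PySem.List.sublist_of_mem_combinations hc))]
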